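-- pv_equiv track=rewrite | github.com/MaxZdanoff/My_Projects | RubiksCubeSolver/Cube_array.py | rotate_moves
-- ===== SOURCE A (Python) =====
-- def rotate_moves(moves, side):
--     rotated_moves = []
--     i = 0
--     if side == 'right':
--         while i < len(moves):
--             if moves[i] == 'R':
--                 rotated_moves.append('B')
--             elif moves[i] == 'R2':
--                 rotated_moves.append('B2')
--             elif moves[i] == '-R':
--                 rotated_moves.append('-B')
--             elif moves[i] == 'L':
--                 rotated_moves.append('F')
--             elif moves[i] == 'L2':
--                 rotated_moves.append('F2')
--             elif moves[i] == '-L':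
--                 rotated_moves.append('-F')
--             elif moves[i] == 'F':
--                 rotated_moves.append('R')
--             elif moves[i] == 'F2':
--                 rotated_moves.append('R2')
--             elif moves[i] == '-F':
--                 rotated_moves.append('-R')
--             elif moves[i] == 'B':
--                 rotated_moves.append('L')
--             elif moves[i] == 'B2':
--                 rotated_moves.append('L2')
--             elif moves[i] == '-B':
--                 rotated_moves.append('-L')
--             else:
--                 rotated_moves.append(moves[i])
--             i += 1
--     elif side == 'left':
--         while i < len(moves):
--             if moves[i] == 'R':
--                 rotated_moves.append('F')
--             elif moves[i] == 'R2':
--                 rotated_moves.append('F2')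
--             elif moves[i] == '-R':
--                 rotated_moves.append('-F')
--             elif moves[i] == 'L':
--                 rotated_moves.append('B')
--             elif moves[i] == 'L2':
--                 rotated_moves.append('B2')
--             elif moves[i] == '-L':
--                 rotated_moves.append('-B')
--             elif moves[i] == 'F':
--                 rotated_moves.append('L')
--             elif moves[i] == 'F2':
--                 rotated_moves.append('L2')
--             elif moves[i] == '-F':
--                 rotated_moves.append('-L')
--             elif moves[i] == 'B':
--                 rotated_moves.append('R')
--             elif moves[i] == 'B2':
--                 rotated_moves.append('R2')
--             elif moves[i] == '-B':
--                 rotated_moves.append('-R')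
--             else:
--                 rotated_moves.append(moves[i])
--             i += 1
--     elif side == 'back':
--         while i < len(moves):
--             if moves[i] == 'R':
--                 rotated_moves.append('L')
--             elif moves[i] == 'R2':
--                 rotated_moves.append('L2')
--             elif moves[i] == '-R':
--                 rotated_moves.append('-L')
--             elif moves[i] == 'L':
--                 rotated_moves.append('R')
--             elif moves[i] == 'L2':
--                 rotated_moves.append('R2')
--             elif moves[i] == '-L':
--                 rotated_moves.append('-R')
--             elif moves[i] == 'F':
--                 rotated_moves.append('B')
--             elif moves[i] == 'F2':
--                 rotated_moves.append('B2')
--             elif moves[i] == '-F':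
--                 rotated_moves.append('-B')
--             elif moves[i] == 'B':
--                 rotated_moves.append('F')
--             elif moves[i] == 'B2':
--                 rotated_moves.append('F2')
--             elif moves[i] == '-B':
--                 rotated_moves.append('-F')
--             else:
--                 rotated_moves.append(moves[i])
--             i += 1
--
--     return rotated_moves
-- ===== SOURCE B (Python) =====
-- def rotate_moves(moves, side):
--     # decompose each token into modifier + face char and apply a per-side face permutation
--     perms = {'right': {'R': 'B', 'L': 'F', 'F': 'R', 'B': 'L'},
--              'left':  {'R': 'F', 'L': 'B', 'F': 'L', 'B': 'R'},
--              'back':  {'R': 'L', 'L': 'R', 'F': 'B', 'B': 'F'}}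
--     perm = perms.get(side)
--     if perm is None:
--         return []
--
--     def transform(m):
--         t = list(m)
--         if len(t) == 1:
--             return perm[t[0]] if t[0] in perm else m
--         if len(t) == 2:
--             c1, c2 = t
--             if c1 == '-' and c2 in perm:
--                 return '-' + perm[c2]
--             if c2 == '2' and c1 in perm:
--                 return perm[c1] + '2'
--             return m
--         return m
--
--     return [transform(m) for m in moves]
-- ===== Notes on version B (the rewrite author's own statement) =====
-- stated objective: simpler
-- what changed: Replaces A's three duplicated 12-way if/elif literal chains with a single pass that decomposes each token into a modifier ('-' prefix or '2' suffix) plus a face character and applies one per-side 4-entry face-permutation dict.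
import Mathlib
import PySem

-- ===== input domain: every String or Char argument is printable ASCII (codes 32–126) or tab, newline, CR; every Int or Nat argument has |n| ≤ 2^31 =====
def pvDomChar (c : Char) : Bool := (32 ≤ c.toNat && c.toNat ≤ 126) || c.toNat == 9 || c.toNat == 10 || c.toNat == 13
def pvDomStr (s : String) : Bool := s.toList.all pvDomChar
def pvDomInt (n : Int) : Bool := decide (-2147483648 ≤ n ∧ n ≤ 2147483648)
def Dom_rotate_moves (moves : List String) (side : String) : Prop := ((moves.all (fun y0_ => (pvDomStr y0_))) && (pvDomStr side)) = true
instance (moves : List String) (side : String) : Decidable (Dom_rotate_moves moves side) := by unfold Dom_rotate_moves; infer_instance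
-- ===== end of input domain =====

-- B splits each token into modifier ('-' / trailing '2') plus a face character and applies a
-- per-side face-permutation table, instead of A's three 12-way literal if/elif chains (objective: simpler).

-- ===== PORT A =====
-- literal transliteration: one while-loop per side appending per token through an if/elif chain
def rotate_moves (moves : List String) (side : String) : List String :=
  if side = "right" then
    moves.foldl (fun acc m => acc ++
      [if m = "R" then "B" else if m = "R2" then "B2" else if m = "-R" then "-B"
       else if m = "L" then "F" else if m = "L2" then "F2" else if m = "-L" then "-F"
       else if m = "F" then "R" else if m = "F2" then "R2" else if m = "-F" then "-R"
       else if m = "B" then "L" else if m = "B2" then "L2" else if m = "-B" then "-L" else m]) []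
  else if side = "left" then
    moves.foldl (fun acc m => acc ++
      [if m = "R" then "F" else if m = "R2" then "F2" else if m = "-R" then "-F"
       else if m = "L" then "B" else if m = "L2" then "B2" else if m = "-L" then "-B"
       else if m = "F" then "L" else if m = "F2" then "L2" else if m = "-F" then "-L"
       else if m = "B" then "R" else if m = "B2" then "R2" else if m = "-B" then "-R" else m]) []
  else if side = "back" then
    moves.foldl (fun acc m => acc ++
      [if m = "R" then "L" else if m = "R2" then "L2" else if m = "-R" then "-L"
       else if m = "L" then "R" else if m = "L2" then "R2" else if m = "-L" then "-R"
       else if m = "F" then "B" else if m = "F2" then "B2" else if m = "-F" then "-B"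
       else if m = "B" then "F" else if m = "B2" then "F2" else if m = "-B" then "-F" else m]) []
  else []

-- ===== PORT B =====
-- the three per-side face-permutation dicts and the dict of dicts (Python dict literals)
def permRight : PySem.Dict Char Char := PySem.Dict.mk [('R','B'),('L','F'),('F','R'),('B','L')]
def permLeft  : PySem.Dict Char Char := PySem.Dict.mk [('R','F'),('L','B'),('F','L'),('B','R')]
def permBack  : PySem.Dict Char Char := PySem.Dict.mk [('R','L'),('L','R'),('F','B'),('B','F')]
def pvPerms : PySem.Dict String (PySem.Dict Char Char) :=
  PySem.Dict.mk [("right", permRight), ("left", permLeft), ("back", permBack)]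

-- transform(m): t = list(m); the three recognized shapes (face, '-'+face, face+'2'), else m
def pvTransform (perm : PySem.Dict Char Char) (m : String) : String :=
  match m.toList with
  | [c] => if (perm.get? c).isSome then String.ofList [(perm.get? c).getD c] else m
  | [c1, c2] =>
      if c1 = '-' ∧ (perm.get? c2).isSome then String.ofList ['-', (perm.get? c2).getD c2]
      else if c2 = '2' ∧ (perm.get? c1).isSome then String.ofList [(perm.get? c1).getD c1, '2']
      else m
  | _ => m

def rotate_moves_alt (moves : List String) (side : String) : List String :=
  match pvPerms.get? side with
  | none => []
  | some perm => moves.map (pvTransform perm)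

-- ===== PRECONDITION & SPEC =====
def Spec_rotate_moves (moves : List String) (side : String) (out : List String) : Prop := out = rotate_moves_alt moves side
instance (moves : List String) (side : String) (out : List String) : Decidable (Spec_rotate_moves moves side out) := by unfold Spec_rotate_moves; infer_instance

-- ===== CLAIM (what is proved, stated in full; the proofs are below) =====
def Claim_equal_rotate_moves : Prop := ∀ (moves : List String) (side : String), Dom_rotate_moves moves side → Spec_rotate_moves moves side (rotate_moves moves side)

-- ===== LEMMAS AND PROOFS =====

-- string literals' character lists (for reducing comparisons in list form)
theorem ofList_eq_iff (l : List Char) (s : String) : String.ofList l = s ↔ l = s.toList :=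
  ⟨fun h => by rw [← h, String.toList_ofList], fun h => by rw [h, String.ofList_toList]⟩
theorem litR  : ("R" : String).toList  = ['R'] := by decide
theorem litL  : ("L" : String).toList  = ['L'] := by decide
theorem litF  : ("F" : String).toList  = ['F'] := by decide
theorem litB  : ("B" : String).toList  = ['B'] := by decide
theorem litR2 : ("R2" : String).toList = ['R','2'] := by decide
theorem litL2 : ("L2" : String).toList = ['L','2'] := by decide
theorem litF2 : ("F2" : String).toList = ['F','2'] := by decide
theorem litB2 : ("B2" : String).toList = ['B','2'] := by decide
theorem litmR : ("-R" : String).toList = ['-','R'] := by decide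
theorem litmL : ("-L" : String).toList = ['-','L'] := by decide
theorem litmF : ("-F" : String).toList = ['-','F'] := by decide
theorem litmB : ("-B" : String).toList = ['-','B'] := by decide

theorem tok_right (m : String) :
    (if m = "R" then "B" else if m = "R2" then "B2" else if m = "-R" then "-B"
     else if m = "L" then "F" else if m = "L2" then "F2" else if m = "-L" then "-F"
     else if m = "F" then "R" else if m = "F2" then "R2" else if m = "-F" then "-R"
     else if m = "B" then "L" else if m = "B2" then "L2" else if m = "-B" then "-L" else m)
    = pvTransform permRight m := by
  obtain ⟨cs, hm⟩ : ∃ cs, m = String.ofList cs := ⟨m.toList, (String.ofList_toList).symm⟩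
  subst hm
  match cs with
  | [] => decide
  | [c] =>
    by_cases h1 : c = 'R'; · subst h1; decide
    by_cases h2 : c = 'L'; · subst h2; decide
    by_cases h3 : c = 'F'; · subst h3; decide
    by_cases h4 : c = 'B'; · subst h4; decide
    simp [pvTransform, permRight, PySem.Dict.get?, litR, litL, litF, litB, litR2, litL2, litF2,
          litB2, litmR, litmL, litmF, litmB, ofList_eq_iff,
          h1, Ne.symm h1, h2, Ne.symm h2, h3, Ne.symm h3, h4, Ne.symm h4]
  | [c1, c2] =>
    by_cases h1 : c1 = '-'
    · subst h1
      by_cases h2 : c2 = 'R'; · subst h2; decide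
      by_cases h3 : c2 = 'L'; · subst h3; decide
      by_cases h4 : c2 = 'F'; · subst h4; decide
      by_cases h5 : c2 = 'B'; · subst h5; decide
      simp [pvTransform, permRight, PySem.Dict.get?, litR, litL, litF, litB, litR2, litL2, litF2,
            litB2, litmR, litmL, litmF, litmB, ofList_eq_iff,
            h2, Ne.symm h2, h3, Ne.symm h3, h4, Ne.symm h4, h5, Ne.symm h5]
    · by_cases h2 : c2 = '2'
      · subst h2
        by_cases h3 : c1 = 'R'; · subst h3; decide
        by_cases h4 : c1 = 'L'; · subst h4; decide
        by_cases h5 : c1 = 'F'; · subst h5; decide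
        by_cases h6 : c1 = 'B'; · subst h6; decide
        simp [pvTransform, permRight, PySem.Dict.get?, litR, litL, litF, litB, litR2, litL2, litF2,
              litB2, litmR, litmL, litmF, litmB, ofList_eq_iff, h1,
              h3, Ne.symm h3, h4, Ne.symm h4, h5, Ne.symm h5, h6, Ne.symm h6]
      · simp [pvTransform, litR, litL, litF, litB, litR2, litL2, litF2, litB2, litmR, litmL,
              litmF, litmB, ofList_eq_iff, h1, h2]
  | c1 :: c2 :: c3 :: rest =>
    simp [pvTransform, litR, litL, litF, litB, litR2, litL2, litF2, litB2, litmR, litmL,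
          litmF, litmB, ofList_eq_iff]

theorem tok_left (m : String) :
    (if m = "R" then "F" else if m = "R2" then "F2" else if m = "-R" then "-F"
     else if m = "L" then "B" else if m = "L2" then "B2" else if m = "-L" then "-B"
     else if m = "F" then "L" else if m = "F2" then "L2" else if m = "-F" then "-L"
     else if m = "B" then "R" else if m = "B2" then "R2" else if m = "-B" then "-R" else m)
    = pvTransform permLeft m := by
  obtain ⟨cs, hm⟩ : ∃ cs, m = String.ofList cs := ⟨m.toList, (String.ofList_toList).symm⟩
  subst hm
  match cs with
  | [] => decide
  | [c] =>
    by_cases h1 : c = 'R'; · subst h1; decide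
    by_cases h2 : c = 'L'; · subst h2; decide
    by_cases h3 : c = 'F'; · subst h3; decide
    by_cases h4 : c = 'B'; · subst h4; decide
    simp [pvTransform, permLeft, PySem.Dict.get?, litR, litL, litF, litB, litR2, litL2, litF2,
          litB2, litmR, litmL, litmF, litmB, ofList_eq_iff,
          h1, Ne.symm h1, h2, Ne.symm h2, h3, Ne.symm h3, h4, Ne.symm h4]
  | [c1, c2] =>
    by_cases h1 : c1 = '-'
    · subst h1
      by_cases h2 : c2 = 'R'; · subst h2; decide
      by_cases h3 : c2 = 'L'; · subst h3; decide
      by_cases h4 : c2 = 'F'; · subst h4; decide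
      by_cases h5 : c2 = 'B'; · subst h5; decide
      simp [pvTransform, permLeft, PySem.Dict.get?, litR, litL, litF, litB, litR2, litL2, litF2,
            litB2, litmR, litmL, litmF, litmB, ofList_eq_iff,
            h2, Ne.symm h2, h3, Ne.symm h3, h4, Ne.symm h4, h5, Ne.symm h5]
    · by_cases h2 : c2 = '2'
      · subst h2
        by_cases h3 : c1 = 'R'; · subst h3; decide
        by_cases h4 : c1 = 'L'; · subst h4; decide
        by_cases h5 : c1 = 'F'; · subst h5; decide
        by_cases h6 : c1 = 'B'; · subst h6; decide
        simp [pvTransform, permLeft, PySem.Dict.get?, litR, litL, litF, litB, litR2, litL2, litF2,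
              litB2, litmR, litmL, litmF, litmB, ofList_eq_iff, h1,
              h3, Ne.symm h3, h4, Ne.symm h4, h5, Ne.symm h5, h6, Ne.symm h6]
      · simp [pvTransform, litR, litL, litF, litB, litR2, litL2, litF2, litB2, litmR, litmL,
              litmF, litmB, ofList_eq_iff, h1, h2]
  | c1 :: c2 :: c3 :: rest =>
    simp [pvTransform, litR, litL, litF, litB, litR2, litL2, litF2, litB2, litmR, litmL,
          litmF, litmB, ofList_eq_iff]

theorem tok_back (m : String) :
    (if m = "R" then "L" else if m = "R2" then "L2" else if m = "-R" then "-L"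
     else if m = "L" then "R" else if m = "L2" then "R2" else if m = "-L" then "-R"
     else if m = "F" then "B" else if m = "F2" then "B2" else if m = "-F" then "-B"
     else if m = "B" then "F" else if m = "B2" then "F2" else if m = "-B" then "-F" else m)
    = pvTransform permBack m := by
  obtain ⟨cs, hm⟩ : ∃ cs, m = String.ofList cs := ⟨m.toList, (String.ofList_toList).symm⟩
  subst hm
  match cs with
  | [] => decide
  | [c] =>
    by_cases h1 : c = 'R'; · subst h1; decide
    by_cases h2 : c = 'L'; · subst h2; decide
    by_cases h3 : c = 'F'; · subst h3; decide
    by_cases h4 : c = 'B'; · subst h4; decide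
    simp [pvTransform, permBack, PySem.Dict.get?, litR, litL, litF, litB, litR2, litL2, litF2,
          litB2, litmR, litmL, litmF, litmB, ofList_eq_iff,
          h1, Ne.symm h1, h2, Ne.symm h2, h3, Ne.symm h3, h4, Ne.symm h4]
  | [c1, c2] =>
    by_cases h1 : c1 = '-'
    · subst h1
      by_cases h2 : c2 = 'R'; · subst h2; decide
      by_cases h3 : c2 = 'L'; · subst h3; decide
      by_cases h4 : c2 = 'F'; · subst h4; decide
      by_cases h5 : c2 = 'B'; · subst h5; decide
      simp [pvTransform, permBack, PySem.Dict.get?, litR, litL, litF, litB, litR2, litL2, litF2,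
            litB2, litmR, litmL, litmF, litmB, ofList_eq_iff,
            h2, Ne.symm h2, h3, Ne.symm h3, h4, Ne.symm h4, h5, Ne.symm h5]
    · by_cases h2 : c2 = '2'
      · subst h2
        by_cases h3 : c1 = 'R'; · subst h3; decide
        by_cases h4 : c1 = 'L'; · subst h4; decide
        by_cases h5 : c1 = 'F'; · subst h5; decide
        by_cases h6 : c1 = 'B'; · subst h6; decide
        simp [pvTransform, permBack, PySem.Dict.get?, litR, litL, litF, litB, litR2, litL2, litF2,
              litB2, litmR, litmL, litmF, litmB, ofList_eq_iff, h1,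
              h3, Ne.symm h3, h4, Ne.symm h4, h5, Ne.symm h5, h6, Ne.symm h6]
      · simp [pvTransform, litR, litL, litF, litB, litR2, litL2, litF2, litB2, litmR, litmL,
              litmF, litmB, ofList_eq_iff, h1, h2]
  | c1 :: c2 :: c3 :: rest =>
    simp [pvTransform, litR, litL, litF, litB, litR2, litL2, litF2, litB2, litmR, litmL,
          litmF, litmB, ofList_eq_iff]

-- ===== VERDICT (by name: the statement is the Claim_ definition above) =====
theorem rotate_moves_spec : Claim_equal_rotate_moves := by
  intro moves side _
  unfold Spec_rotate_moves rotate_moves rotate_moves_alt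
  by_cases hr : side = "right"
  · subst hr
    rw [if_pos rfl, PySem.List.foldl_append_singleton_eq_map,
        show pvPerms.get? "right" = some permRight from by decide]
    simpa using List.map_congr_left (fun m _ => tok_right m)
  · by_cases hl : side = "left"
    · subst hl
      rw [if_neg (by decide), if_pos rfl, PySem.List.foldl_append_singleton_eq_map,
          show pvPerms.get? "left" = some permLeft from by decide]
      simpa using List.map_congr_left (fun m _ => tok_left m)
    · by_cases hb : side = "back"
      · subst hb
        rw [if_neg (by decide), if_neg (by decide), if_pos rfl,
            PySem.List.foldl_append_singleton_eq_map,
            show pvPerms.get? "back" = some permBack from by decide]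
        simpa using List.map_congr_left (fun m _ => tok_back m)
      · rw [if_neg hr, if_neg hl, if_neg hb,
            show pvPerms.get? side = none from by
              simp [pvPerms, PySem.Dict.get?, Ne.symm hr, Ne.symm hl, Ne.symm hb]]
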